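-- pv_equiv track=rewrite | github.com/Future-Hangglider/hangspotdetection | gpspostprocessing/ubxutils.py | checkchecksumUBX
-- ===== SOURCE A (Python) =====
-- def checkchecksumUBX(header, payload, cca, ccb):
--     ca, cb = 0, 0
--     for c in header:
--         ca = (ca + c) & 0xFF
--         cb = (cb + ca) & 0xFF
--     for c in payload:
--         ca = (ca + c) & 0xFF
--         cb = (cb + ca) & 0xFF
--     return ca == cca and cb == ccb
-- ===== SOURCE B (Python) =====
-- def checkchecksumUBX(header, payload, cca, ccb):
--     data = header + payload
--     n = len(data)
--     ca = sum(data) & 0xFF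
--     cb = sum((n - i) * c for i, c in enumerate(data)) & 0xFF
--     return ca == cca and cb == ccb
-- ===== Notes on version B (the rewrite author's own statement) =====
-- stated objective: alternative
-- what changed: Replaces A's two threaded (ca,cb) accumulator loops by two independent closed-form sums over header+payload: ca = sum(data) mod 256 and cb = the (n-i)-weighted sum mod 256, masked once at the end.
import Mathlib
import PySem

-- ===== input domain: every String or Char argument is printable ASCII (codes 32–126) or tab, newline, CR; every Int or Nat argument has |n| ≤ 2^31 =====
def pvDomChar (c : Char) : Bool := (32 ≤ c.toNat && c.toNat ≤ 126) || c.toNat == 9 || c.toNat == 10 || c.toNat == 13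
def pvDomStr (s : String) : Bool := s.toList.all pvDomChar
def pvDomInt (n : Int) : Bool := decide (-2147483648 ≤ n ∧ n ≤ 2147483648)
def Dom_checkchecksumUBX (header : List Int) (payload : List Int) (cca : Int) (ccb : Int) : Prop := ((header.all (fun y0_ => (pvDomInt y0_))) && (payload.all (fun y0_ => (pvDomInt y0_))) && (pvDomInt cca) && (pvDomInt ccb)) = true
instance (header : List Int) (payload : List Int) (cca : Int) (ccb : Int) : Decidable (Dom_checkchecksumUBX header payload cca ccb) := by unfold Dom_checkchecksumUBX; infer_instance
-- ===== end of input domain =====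

-- B replaces A's two threaded (ca,cb) accumulator loops by two independent closed-form sums
-- (plain sum and (n-i)-weighted sum over header+payload), each masked once: an alternative, same-cost strategy.

-- ===== PORT A =====
-- one loop step of A; `x & 0xFF` on Python ints is exactly `x % 256` (Int.emod, nonneg divisor) for all ints
def ubxStep (s : Int × Int) (c : Int) : Int × Int :=
  ((s.1 + c) % 256, (s.2 + (s.1 + c) % 256) % 256)

def checkchecksumUBX (header : List Int) (payload : List Int) (cca : Int) (ccb : Int) : Bool :=
  let s1 := header.foldl ubxStep (0, 0)
  let s2 := payload.foldl ubxStep s1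
  (s2.1 == cca) && (s2.2 == ccb)

-- ===== PORT B =====
def checkchecksumUBX_alt (header : List Int) (payload : List Int) (cca : Int) (ccb : Int) : Bool :=
  let data := header ++ payload
  let n : Int := data.length
  let ca := data.sum % 256
  let cb := ((PySem.List.enumerate data).map (fun ic => (n - ic.1) * ic.2)).sum % 256
  (ca == cca) && (cb == ccb)

-- ===== PRECONDITION & SPEC =====
def Spec_checkchecksumUBX (header : List Int) (payload : List Int) (cca : Int) (ccb : Int) (out : Bool) : Prop := out = checkchecksumUBX_alt header payload cca ccb
instance (header : List Int) (payload : List Int) (cca : Int) (ccb : Int) (out : Bool) : Decidable (Spec_checkchecksumUBX header payload cca ccb out) := by unfold Spec_checkchecksumUBX; infer_instance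

-- ===== CLAIM (what is proved, stated in full; the proofs are below) =====
def Claim_equal_checkchecksumUBX : Prop := ∀ (header : List Int) (payload : List Int) (cca : Int) (ccb : Int), Dom_checkchecksumUBX header payload cca ccb → Spec_checkchecksumUBX header payload cca ccb (checkchecksumUBX header payload cca ccb)

-- ===== LEMMAS AND PROOFS =====

/-- the (len-i)-weighted sum, written structurally: the head gets weight `length`. -/
def wsum : List Int → Int
  | [] => 0
  | c :: t => ((t.length : Int) + 1) * c + wsum t

theorem fold_ubx (l : List Int) : ∀ (a b : Int),
    l.foldl ubxStep (a % 256, b % 256) =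
      ((a + l.sum) % 256, (b + l.length * a + wsum l) % 256) := by
  induction l with
  | nil => intro a b; simp [wsum]
  | cons c t ih =>
    intro a b
    have hstep : ubxStep (a % 256, b % 256) c = ((a + c) % 256, (b + a + c) % 256) := by
      simp only [ubxStep, Prod.mk.injEq]
      refine ⟨by omega, by omega⟩
    rw [List.foldl_cons, hstep, ih (a + c) (b + a + c)]
    simp only [List.sum_cons, List.length_cons, wsum, Prod.mk.injEq]
    refine ⟨by congr 1; ring, by congr 1; push_cast; ring⟩

theorem enum_wsum (l : List Int) : ∀ (k n : Int), n = k + l.length →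
    ((PySem.List.enumerate l k).map (fun ic => (n - ic.1) * ic.2)).sum = wsum l := by
  induction l with
  | nil => intro k n _; simp [PySem.List.enumerate_nil, wsum]
  | cons c t ih =>
    intro k n h
    rw [PySem.List.enumerate_cons]
    simp only [List.map_cons, List.sum_cons]
    rw [ih (k + 1) n (by simp only [List.length_cons] at h; push_cast at h ⊢; omega)]
    have hw : n - k = (t.length : Int) + 1 := by
      simp only [List.length_cons] at h; push_cast at h ⊢; omega
    rw [hw, wsum]

theorem wsum_append (h t : List Int) :
    wsum (h ++ t) = wsum h + t.length * h.sum + wsum t := by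
  induction h with
  | nil => simp [wsum]
  | cons c hs ih =>
    simp only [List.cons_append, wsum, ih, List.length_append, List.sum_cons]
    push_cast
    ring

-- ===== VERDICT (by name: the statement is the Claim_ definition above) =====
theorem checkchecksumUBX_spec : Claim_equal_checkchecksumUBX := by
  unfold Claim_equal_checkchecksumUBX
  intro header payload cca ccb _
  unfold Spec_checkchecksumUBX
  have hA : payload.foldl ubxStep (header.foldl ubxStep ((0 : Int), (0 : Int))) =
      ((header.sum + payload.sum) % 256,
       (wsum header + (payload.length : Int) * header.sum + wsum payload) % 256) := by
    rw [show ((0 : Int), (0 : Int)) = ((0 : Int) % 256, (0 : Int) % 256) from rfl, fold_ubx,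
      fold_ubx]
    simp only [Prod.mk.injEq]
    refine ⟨by congr 1; ring, by congr 1; ring⟩
  have hB : ((PySem.List.enumerate (header ++ payload)).map
        (fun ic => (((header ++ payload).length : Int) - ic.1) * ic.2)).sum
      = wsum header + (payload.length : Int) * header.sum + wsum payload := by
    rw [enum_wsum (header ++ payload) 0 ((header ++ payload).length : Int) (by ring),
      wsum_append]
  simp only [checkchecksumUBX, checkchecksumUBX_alt, hA, hB, List.sum_append]
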